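-- pv_equiv track=rewrite | github.com/bugpigg/algorithm_python | fromSchool/최대합구간(DP)/Main.py | solve
-- ===== SOURCE A (Python) =====
-- def solve(A):
-- 	L = len(A) # 입력받은 배열 A의 길이를 변수 L에 저장
-- 	ToRight = [None]*L # ToRight[i]는 배열 A[i]를 기준으로 왼쪽 부분의 최대부분합이다.
-- 	ToLeft = [None]*L # ToLeft[j]는 배열 A[j]를 기준으로 오른쪽 부분의 최대부분합이다.
-- 	for i in range(L):
-- 		if i == 0: # ToRight의 첫번째 원소, ToLeft의 마지막원소는 0이다.
-- 			ToRight[0] = 0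
-- 			ToLeft[L-1] = 0
-- 		else:
-- 			ToRight[i] = max(ToRight[i-1]+A[i-1],0) # ToRight[i]는 (A[i-1]+ ToRight[i-1])과 0 중 max 값으로 선정한다.
-- 			ToLeft[L-i-1] = max(ToLeft[L-i]+A[L-i],0) # ToLeft[j]는 (A[j+1]+ ToLeft[j+1])과 0 중 max 값으로 선정한다.
-- 	return [x+y+z for x,y,z in zip(A,ToRight,ToLeft)] # 배열 A, ToRight, ToLeft를 각 인덱스에 맞추어 더하면 구하고자 하는 결과를 얻는다.
-- ===== SOURCE B (Python) =====
-- def solve(A):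
--     # answer[i] = max sum of a subarray containing i
--     #           = max_{r >= i} P[r+1]  -  min_{l <= i} P[l]   over prefix sums P
--     P = [0]
--     for a in A:
--         P.append(P[-1] + a)
--     lo = []                      # lo[i] = min(P[0..i])
--     m = 0
--     for p in P[:-1]:
--         m = min(m, p)
--         lo.append(m)
--     rev = P[1:][::-1]
--     M = rev[0] if rev else 0
--     hi = []                      # hi[i] = max(P[i+1..L]) (built reversed)
--     for p in rev:
--         M = max(M, p)
--         hi.append(M)
--     hi.reverse()
--     return [h - l for h, l in zip(hi, lo)]
-- ===== Notes on version B (the rewrite author's own statement) =====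
-- stated objective: alternative
-- what changed: Replaces A's Kadane-style DP (clamped best-sum-ending-here recurrences built left and right, summed with A[i]) by a prefix-sum formulation: answer[i] = max_{r>=i} P[r+1] - min_{l<=i} P[l], computed via one prefix-sum pass, a running minimum forward and a running maximum backward, then one subtraction per index.
import Mathlib
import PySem

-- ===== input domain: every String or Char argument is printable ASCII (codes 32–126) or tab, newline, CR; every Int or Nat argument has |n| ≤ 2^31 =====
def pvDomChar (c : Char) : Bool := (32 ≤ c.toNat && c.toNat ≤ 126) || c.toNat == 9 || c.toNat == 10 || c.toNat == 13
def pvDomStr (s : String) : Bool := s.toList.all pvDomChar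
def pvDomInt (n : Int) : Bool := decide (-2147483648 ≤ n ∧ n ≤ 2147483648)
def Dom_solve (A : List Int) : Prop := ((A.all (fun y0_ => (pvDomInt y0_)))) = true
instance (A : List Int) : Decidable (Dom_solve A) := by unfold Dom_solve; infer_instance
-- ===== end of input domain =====

-- B replaces A's two clamped DP recurrences by the prefix-sum identity
-- answer[i] = max_{r ≥ i} P[r+1] - min_{l ≤ i} P[l]; objective: alternative.

-- ===== PORT A =====
-- One loop body iteration of A: at i = 0 seeds ToRight[0] and ToLeft[L-1],
-- otherwise sets ToRight[i] and ToLeft[L-i-1].  All indices read/written are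
-- nonnegative and in range whenever executed (i ranges over range(L)), so Nat
-- indexing with List.set / List.getD is exact.  The `None` cells of the Python
-- arrays are never read; they are represented by 0 here.
def solveStep (A : List Int) (L : Nat) (st : List Int × List Int) (i : Nat) : List Int × List Int :=
  if i = 0 then
    (st.1.set 0 0, st.2.set (L - 1) 0)
  else
    (st.1.set i (max (st.1.getD (i - 1) 0 + A.getD (i - 1) 0) 0),
     st.2.set (L - i - 1) (max (st.2.getD (L - i) 0 + A.getD (L - i) 0) 0))

def solve (A : List Int) : List Int :=
  let L := A.length
  let st := (List.range L).foldl (solveStep A L) (List.replicate L 0, List.replicate L 0)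
  (A.zip (st.1.zip st.2)).map (fun p => p.1 + p.2.1 + p.2.2)

-- ===== PORT B =====
-- prefix sums of Source B: (c+a) :: … is "P.append(P[-1]+a)" with accumulator c = P[-1]
def psums : List Int → Int → List Int
  | [], _ => []
  | a :: rest, c => (c + a) :: psums rest (c + a)

-- "m = min(m, p); lo.append(m)" running-minimum scan
def scanMin : List Int → Int → List Int
  | [], _ => []
  | p :: rest, m => (min m p) :: scanMin rest (min m p)

-- "M = max(M, p); hi.append(M)" running-maximum scan
def scanMax : List Int → Int → List Int
  | [], _ => []
  | p :: rest, M => (max M p) :: scanMax rest (max M p)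

def solve_alt (A : List Int) : List Int :=
  let P := 0 :: psums A 0                       -- P = [0]; for a in A: P.append(P[-1]+a)
  let lo := scanMin P.dropLast 0                -- running min over P[:-1], seed m = 0
  let rev := (psums A 0).reverse                -- rev = P[1:][::-1]
  let hi := (scanMax rev (rev.getD 0 0)).reverse -- running max over rev, seed M = rev[0] if rev else 0
  (hi.zip lo).map (fun p => p.1 - p.2)          -- [h - l for h, l in zip(hi, lo)]

-- ===== PRECONDITION & SPEC =====
def Spec_solve (A : List Int) (out : List Int) : Prop := out = solve_alt A
instance (A : List Int) (out : List Int) : Decidable (Spec_solve A out) := by unfold Spec_solve; infer_instance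

-- ===== CLAIM (what is proved, stated in full; the proofs are below) =====
def Claim_equal_solve : Prop := ∀ (A : List Int), Dom_solve A → Spec_solve A (solve A)

-- ===== LEMMAS AND PROOFS =====

-- ---------- A-side characterisation (loop invariant of the interleaved loop) ----------

-- TRgen l c i : value of A's ToRight accumulator after consuming l[0..i), started at c.
def TRgen (l : List Int) (c : Int) : Nat → Int
  | 0 => c
  | i + 1 => max (TRgen l c i + l.getD i 0) 0

-- TL A j : A's ToLeft[j] (via the reversed list).
def TL (A : List Int) (j : Nat) : Int := TRgen A.reverse 0 (A.length - 1 - j)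

theorem TRgen_succ (l : List Int) (c : Int) (i : Nat) :
    TRgen l c (i + 1) = max (TRgen l c i + l.getD i 0) 0 := rfl

theorem getD_map_range (f : Nat → Int) (L j : Nat) (h : j < L) :
    (((List.range L).map f).getD j 0) = f j := by
  rw [List.getD_eq_getElem _ _ (by simpa using h)]
  simp

theorem set_map_range (f : Nat → Int) (L j : Nat) (v : Int) :
    ((List.range L).map f).set j v = (List.range L).map (fun i => if i = j then v else f i) := by
  apply List.ext_getElem
  · simp
  · intro i h1 h2
    simp only [List.getElem_set, List.getElem_map, List.getElem_range]
    by_cases he : j = i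
    · rw [if_pos he, if_pos he.symm]
    · rw [if_neg he, if_neg (fun h => he h.symm)]

theorem map_range_congr (f g : Nat → Int) (L : Nat) (h : ∀ i, i < L → f i = g i) :
    (List.range L).map f = (List.range L).map g := by
  apply List.map_congr_left
  intro i hi
  exact h i (List.mem_range.mp hi)

-- TL recurrence: for 1 ≤ k < L,  TL A (L-k-1) = max (TL A (L-k) + A[L-k], 0).
theorem TL_step (A : List Int) (k : Nat) (hk : 1 ≤ k) (hkL : k < A.length) :
    TL A (A.length - k - 1) = max (TL A (A.length - k) + A.getD (A.length - k) 0) 0 := by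
  set L := A.length with hL
  have h1 : L - 1 - (L - k - 1) = (L - 1 - (L - k)) + 1 := by omega
  have h2 : A.reverse.getD (L - 1 - (L - k)) 0 = A.getD (L - k) 0 := by
    have hlt : L - 1 - (L - k) < L := by omega
    rw [List.getD_eq_getElem _ _ (by simpa using hlt),
        List.getD_eq_getElem _ _ (by omega : L - k < A.length)]
    rw [List.getElem_reverse]
    congr 1
    omega
  unfold TL
  rw [← hL, h1]
  simp only [TRgen, h2]

-- invariant shapes of the two arrays after k loop iterations
def trInv (A : List Int) (k : Nat) : List Int :=
  (List.range A.length).map (fun i => if i < k then TRgen A 0 i else 0)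

def tlInv (A : List Int) (k : Nat) : List Int :=
  (List.range A.length).map (fun i => if A.length - k ≤ i then TL A i else 0)

theorem replicate_eq_trInv0 (A : List Int) :
    (List.replicate A.length (0 : Int), List.replicate A.length (0 : Int)) = (trInv A 0, tlInv A 0) := by
  unfold trInv tlInv
  simp only [Prod.mk.injEq]
  refine ⟨?_, ?_⟩ <;>
  · apply List.ext_getElem
    · simp
    · intro i h1 h2
      have hi : i < A.length := by simpa using h1
      simp only [List.getElem_replicate, List.getElem_map, List.getElem_range]
      rw [if_neg (by omega)]

theorem TL_last (A : List Int) : TL A (A.length - 1) = 0 := by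
  unfold TL
  rw [Nat.sub_self]
  rfl

theorem TRgen_pred (A : List Int) (k : Nat) (hk : 1 ≤ k) :
    TRgen A 0 k = max (TRgen A 0 (k - 1) + A.getD (k - 1) 0) 0 := by
  obtain ⟨m, rfl⟩ : ∃ m, k = m + 1 := ⟨k - 1, by omega⟩
  rw [TRgen_succ]
  simp

theorem solveStep_inv (A : List Int) (k : Nat) (hk : k < A.length) :
    solveStep A A.length (trInv A k, tlInv A k) k = (trInv A (k + 1), tlInv A (k + 1)) := by
  set L := A.length with hL
  rcases Nat.eq_zero_or_pos k with h0 | hpos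
  · subst h0
    unfold solveStep
    rw [if_pos rfl]
    unfold trInv tlInv
    rw [set_map_range, set_map_range]
    simp only [Prod.mk.injEq]
    refine ⟨?_, ?_⟩
    · apply map_range_congr
      intro i hi
      by_cases he : i = 0
      · subst he
        rw [if_pos rfl, if_pos (by omega)]
        rfl
      · rw [if_neg he, if_neg (by omega : ¬ i < 0), if_neg (by omega : ¬ i < 0 + 1)]
    · apply map_range_congr
      intro i hi
      by_cases he : i = L - 1
      · rw [if_pos he, if_pos (by omega : L - (0 + 1) ≤ i), he, hL, TL_last]
      · rw [if_neg he, if_neg (by omega : ¬ L - 0 ≤ i), if_neg (by omega : ¬ L - (0 + 1) ≤ i)]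
  · unfold solveStep
    have hne : ¬ (k = 0) := by omega
    rw [if_neg hne]
    unfold trInv tlInv
    have g1 : ((List.range L).map (fun i => if i < k then TRgen A 0 i else 0)).getD (k - 1) 0
        = TRgen A 0 (k - 1) := by
      rw [getD_map_range _ _ _ (by omega)]
      rw [if_pos (by omega)]
    have g2 : ((List.range L).map (fun i => if L - k ≤ i then TL A i else 0)).getD (L - k) 0
        = TL A (L - k) := by
      rw [getD_map_range _ _ _ (by omega)]
      rw [if_pos (by omega)]
    rw [g1, g2, set_map_range, set_map_range]
    simp only [Prod.mk.injEq]
    refine ⟨?_, ?_⟩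
    · apply map_range_congr
      intro i hi
      by_cases he : i = k
      · subst he
        rw [if_pos rfl, if_pos (by omega : i < i + 1), TRgen_pred A i hpos]
      · by_cases hlt : i < k
        · rw [if_neg he, if_pos hlt, if_pos (by omega)]
        · rw [if_neg he, if_neg hlt, if_neg (by omega)]
    · apply map_range_congr
      intro i hi
      by_cases he : i = L - k - 1
      · rw [if_pos he, if_pos (by omega : L - (k + 1) ≤ i), he, TL_step A k hpos (by omega)]
      · by_cases hge : L - k ≤ i
        · rw [if_neg he, if_pos hge, if_pos (by omega)]
        · rw [if_neg he, if_neg hge, if_neg (by omega)]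

theorem foldl_inv (A : List Int) (k : Nat) (hk : k ≤ A.length) :
    (List.range k).foldl (solveStep A A.length)
        (List.replicate A.length 0, List.replicate A.length 0) = (trInv A k, tlInv A k) := by
  induction k with
  | zero => simpa using replicate_eq_trInv0 A
  | succ k ih =>
    rw [List.range_succ, List.foldl_append, ih (by omega)]
    simpa using solveStep_inv A k (by omega)

-- ---------- prefix-sum characterisation ----------

-- Pf A k : sum of the first k elements of A.
def Pf (A : List Int) (k : Nat) : Int := (A.take k).sum

-- mPre A i = min (Pf A 0) … (Pf A i)
def mPre (A : List Int) : Nat → Int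
  | 0 => 0
  | i + 1 => min (mPre A i) (Pf A (i + 1))

-- msAux A d = max (Pf A (L-d)) … (Pf A L)
def msAux (A : List Int) : Nat → Int
  | 0 => Pf A A.length
  | d + 1 => max (msAux A d) (Pf A (A.length - d - 1))

theorem Pf_succ (A : List Int) (i : Nat) (h : i < A.length) :
    Pf A (i + 1) = Pf A i + A.getD i 0 := by
  unfold Pf
  rw [List.take_add_one, List.sum_append, List.getElem?_eq_getElem h,
      List.getD_eq_getElem _ _ h]
  simp

-- TRgen = prefix sum minus running minimum of prefix sums
theorem TRgen_eq (l : List Int) (i : Nat) (h : i ≤ l.length) :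
    TRgen l 0 i = Pf l i - mPre l i := by
  induction i with
  | zero => simp [TRgen, Pf, mPre]
  | succ i ih =>
    rw [TRgen_succ, ih (by omega)]
    have hps := Pf_succ l i (by omega)
    simp only [mPre]
    omega

theorem Pf_reverse (A : List Int) (k : Nat) (h : k ≤ A.length) :
    Pf A.reverse k = A.sum - Pf A (A.length - k) := by
  unfold Pf
  rw [List.take_reverse]
  have : A.length - (A.length - k) = k := by omega
  rw [List.sum_reverse]
  have hsplit := List.sum_take_add_sum_drop A (A.length - k)
  have hd : (A.drop (A.length - k)).length = k := by simp; omega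
  omega

theorem mPre_reverse (A : List Int) (t : Nat) (h : t ≤ A.length) :
    mPre A.reverse t = A.sum - msAux A t := by
  induction t with
  | zero =>
    simp only [mPre, msAux]
    have := Pf_reverse A 0 (by omega)
    unfold Pf at *
    simp
  | succ t ih =>
    simp only [mPre, msAux]
    rw [ih (by omega), Pf_reverse A (t + 1) (by omega)]
    have : A.length - (t + 1) = A.length - t - 1 := by omega
    rw [this]
    omega

-- ---------- B-side scans ----------

def runMin (l : List Int) (m : Int) : Nat → Int
  | 0 => min m (l.getD 0 0)
  | i + 1 => min (runMin l m i) (l.getD (i + 1) 0)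

def runMax (l : List Int) (m : Int) : Nat → Int
  | 0 => max m (l.getD 0 0)
  | i + 1 => max (runMax l m i) (l.getD (i + 1) 0)

theorem runMin_cons (rest : List Int) (a m : Int) (i : Nat) :
    runMin (a :: rest) m (i + 1) = runMin rest (min m a) i := by
  induction i with
  | zero => simp [runMin]
  | succ i ih =>
    have hstep : runMin (a :: rest) m (i + 1 + 1)
        = min (runMin (a :: rest) m (i + 1)) ((a :: rest).getD (i + 2) 0) := rfl
    rw [hstep, ih, List.getD_cons_succ]
    rfl

theorem runMax_cons (rest : List Int) (a m : Int) (i : Nat) :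
    runMax (a :: rest) m (i + 1) = runMax rest (max m a) i := by
  induction i with
  | zero => simp [runMax]
  | succ i ih =>
    have hstep : runMax (a :: rest) m (i + 1 + 1)
        = max (runMax (a :: rest) m (i + 1)) ((a :: rest).getD (i + 2) 0) := rfl
    rw [hstep, ih, List.getD_cons_succ]
    rfl

theorem scanMin_length (l : List Int) (m : Int) : (scanMin l m).length = l.length := by
  induction l generalizing m with
  | nil => rfl
  | cons a rest ih => simp [scanMin, ih]

theorem scanMax_length (l : List Int) (m : Int) : (scanMax l m).length = l.length := by
  induction l generalizing m with
  | nil => rfl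
  | cons a rest ih => simp [scanMax, ih]

theorem scanMin_getElem (l : List Int) (m : Int) (i : Nat) (h : i < (scanMin l m).length) :
    (scanMin l m)[i] = runMin l m i := by
  induction l generalizing m i with
  | nil => simp [scanMin] at h
  | cons a rest ih =>
    cases i with
    | zero => simp [scanMin, runMin]
    | succ i =>
      have h' : i < (scanMin rest (min m a)).length := by simpa [scanMin] using h
      simp only [scanMin, List.getElem_cons_succ]
      rw [ih _ _ h', runMin_cons]

theorem scanMax_getElem (l : List Int) (m : Int) (i : Nat) (h : i < (scanMax l m).length) :
    (scanMax l m)[i] = runMax l m i := by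
  induction l generalizing m i with
  | nil => simp [scanMax] at h
  | cons a rest ih =>
    cases i with
    | zero => simp [scanMax, runMax]
    | succ i =>
      have h' : i < (scanMax rest (max m a)).length := by simpa [scanMax] using h
      simp only [scanMax, List.getElem_cons_succ]
      rw [ih _ _ h', runMax_cons]

theorem psums_length (A : List Int) (c : Int) : (psums A c).length = A.length := by
  induction A generalizing c with
  | nil => rfl
  | cons a rest ih => simp [psums, ih]

theorem psums_getD (A : List Int) (c : Int) (k : Nat) (h : k < A.length) :
    (psums A c).getD k 0 = c + Pf A (k + 1) := by
  induction A generalizing c k with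
  | nil => simp at h
  | cons a rest ih =>
    cases k with
    | zero => simp [psums, Pf]
    | succ k =>
      have h' : k < rest.length := by simpa using h
      simp only [psums, List.getD_cons_succ]
      rw [ih _ _ h']
      have : Pf (a :: rest) (k + 2) = a + Pf rest (k + 1) := by
        unfold Pf
        simp [List.take_succ_cons]
      rw [this]
      ring

-- the list P[:-1] = (0 :: psums A 0).dropLast, element k is Pf A k for k < L
theorem dropLastP_getD (A : List Int) (k : Nat) (h : k < A.length) :
    ((0 :: psums A 0).dropLast).getD k 0 = Pf A k := by
  have hlen : ((0 :: psums A 0).dropLast).length = A.length := by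
    simp [psums_length]
  rw [List.getD_eq_getElem _ _ (by omega)]
  rw [List.getElem_dropLast]
  cases k with
  | zero => simp [Pf]
  | succ k =>
    have hk : k < A.length := by omega
    simp only [List.getElem_cons_succ]
    have := psums_getD A 0 k hk
    rw [List.getD_eq_getElem _ _ (by rw [psums_length]; omega)] at this
    rw [this]
    ring

-- rev = (psums A 0).reverse, element t is Pf A (L - t) for t < L
theorem rev_getD (A : List Int) (t : Nat) (h : t < A.length) :
    ((psums A 0).reverse).getD t 0 = Pf A (A.length - t) := by
  rw [List.getD_eq_getElem _ _ (by simp [psums_length]; omega)]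
  rw [List.getElem_reverse]
  have hk : (psums A 0).length - 1 - t < A.length := by rw [psums_length]; omega
  have := psums_getD A 0 ((psums A 0).length - 1 - t) hk
  rw [List.getD_eq_getElem _ _ (by rw [psums_length] at *; omega)] at this
  rw [this, psums_length]
  have : A.length - 1 - t + 1 = A.length - t := by omega
  rw [this]
  ring

theorem runMin_lo (A : List Int) (i : Nat) (h : i < A.length) :
    runMin ((0 :: psums A 0).dropLast) 0 i = mPre A i := by
  induction i with
  | zero =>
    simp only [runMin, mPre]
    rw [dropLastP_getD A 0 (by omega)]
    simp [Pf]
  | succ i ih =>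
    simp only [runMin, mPre]
    rw [ih (by omega), dropLastP_getD A (i + 1) h]

theorem runMax_hi (A : List Int) (t : Nat) (h : t < A.length) :
    runMax ((psums A 0).reverse) (((psums A 0).reverse).getD 0 0) t = msAux A t := by
  have hL : 0 < A.length := by omega
  have hhead : ((psums A 0).reverse).getD 0 0 = Pf A A.length := by
    simpa using rev_getD A 0 hL
  induction t with
  | zero =>
    simp only [runMax, msAux]
    rw [hhead]
    simp
  | succ t ih =>
    simp only [runMax, msAux]
    rw [ih (by omega), rev_getD A (t + 1) h]
    have h2 : A.length - (t + 1) = A.length - t - 1 := by omega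
    rw [h2]

-- ---------- assembly ----------

theorem solve_getElem (A : List Int) :
    solve A = (List.range A.length).map
      (fun i => A.getD i 0 + TRgen A 0 i + TL A i) := by
  unfold solve
  simp only
  rw [foldl_inv A A.length (le_refl _)]
  apply List.ext_getElem
  · simp [trInv, tlInv]
  · intro i h1 h2
    have hi : i < A.length := by simpa [trInv, tlInv] using h1
    simp only [List.getElem_map, List.getElem_zip, List.getElem_range, trInv, tlInv]
    rw [List.getD_eq_getElem _ _ hi]
    rw [if_pos hi, if_pos (by omega : A.length - A.length ≤ i)]

theorem solve_alt_getElem (A : List Int) :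
    solve_alt A = (List.range A.length).map
      (fun i => msAux A (A.length - 1 - i) - mPre A i) := by
  unfold solve_alt
  simp only
  apply List.ext_getElem
  · simp [scanMin_length, scanMax_length, psums_length]
  · intro i h1 h2
    have hi : i < A.length := by
      simpa [scanMin_length, scanMax_length, psums_length] using h1
    simp only [List.getElem_map, List.getElem_zip, List.getElem_range]
    have hhi : ((scanMax ((psums A 0).reverse) (((psums A 0).reverse).getD 0 0)).reverse)[i]'(by
        simp [scanMax_length, psums_length]; omega) = msAux A (A.length - 1 - i) := by
      rw [List.getElem_reverse, scanMax_getElem]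
      have : (scanMax ((psums A 0).reverse) (((psums A 0).reverse).getD 0 0)).length - 1 - i
          = A.length - 1 - i := by simp [scanMax_length, psums_length]
      rw [this]
      exact runMax_hi A _ (by omega)
    have hlo : (scanMin ((0 :: psums A 0).dropLast) 0)[i]'(by
        simp [scanMin_length, psums_length]; omega) = mPre A i := by
      rw [scanMin_getElem]
      exact runMin_lo A i hi
    rw [hhi, hlo]

theorem final_pointwise (A : List Int) (i : Nat) (h : i < A.length) :
    A.getD i 0 + TRgen A 0 i + TL A i = msAux A (A.length - 1 - i) - mPre A i := by
  have htr := TRgen_eq A i (by omega)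
  have htl : TL A i = msAux A (A.length - 1 - i) - Pf A (i + 1) := by
    unfold TL
    rw [TRgen_eq A.reverse (A.length - 1 - i) (by simp; omega)]
    rw [Pf_reverse A (A.length - 1 - i) (by omega),
        mPre_reverse A (A.length - 1 - i) (by omega)]
    have : A.length - (A.length - 1 - i) = i + 1 := by omega
    rw [this]
    ring
  have hps := Pf_succ A i h
  omega

-- ===== VERDICT (by name: the statement is the Claim_ definition above) =====
theorem solve_spec : Claim_equal_solve := by
  intro A _
  unfold Spec_solve
  rw [solve_getElem, solve_alt_getElem]
  apply map_range_congr
  intro i hi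
  exact final_pointwise A i hi
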